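-- pv_equiv track=rewrite | github.com/ialsaud/StyleTreeAlgorithm | Node.py | compare_dictionaries
-- ===== SOURCE A (Python) =====
-- def compare_dictionaries(dict1, dict2):
--     for key in set(dict1.keys()).union(dict2.keys()):
--         if key not in dict1:
--             return False
--         elif key not in dict2:
--             return False
--         elif dict1[key] != dict2[key]:
--             return False
--     return True
-- ===== SOURCE B (Python) =====
-- def compare_dictionaries(dict1, dict2):
--     if len(dict1) != len(dict2):
--         return False
--     for key, value in dict1.items():
--         if key not in dict2 or dict2[key] != value:
--             return False
--     return True
-- ===== Notes on version B (the rewrite author's own statement) =====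
-- stated objective: simpler
-- what changed: Replaces A's construction of the union key set and symmetric two-sided membership checks with a length guard plus a single one-sided scan over dict1.items().
import Mathlib
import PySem

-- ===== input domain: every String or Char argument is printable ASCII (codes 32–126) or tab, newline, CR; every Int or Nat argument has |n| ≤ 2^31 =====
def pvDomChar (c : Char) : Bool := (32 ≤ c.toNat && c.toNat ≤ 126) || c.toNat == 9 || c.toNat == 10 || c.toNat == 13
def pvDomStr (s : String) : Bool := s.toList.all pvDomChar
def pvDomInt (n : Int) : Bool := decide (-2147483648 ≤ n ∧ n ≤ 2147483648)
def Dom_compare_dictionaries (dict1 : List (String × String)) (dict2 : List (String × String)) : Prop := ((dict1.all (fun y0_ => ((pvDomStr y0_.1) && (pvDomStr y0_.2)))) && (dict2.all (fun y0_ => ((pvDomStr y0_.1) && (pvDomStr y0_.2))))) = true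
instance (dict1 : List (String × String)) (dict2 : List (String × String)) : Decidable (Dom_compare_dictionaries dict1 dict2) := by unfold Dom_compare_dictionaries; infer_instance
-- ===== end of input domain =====

-- B replaces A's union-key-set construction and symmetric membership checks by a
-- length guard plus a one-sided scan over dict1's items (objective: simpler).

-- ===== PORT A =====
-- the 'for key in …: if … return False' loop of A, with early return
def goA (d1 d2 : PySem.Dict String String) : List String → Bool
  | [] => true
  | k :: ks =>
    if !(d1.contains k) then false
    else if !(d2.contains k) then false
    else if d1.get? k != d2.get? k then false
    else goA d1 d2 ks

def compare_dictionaries (dict1 : List (String × String)) (dict2 : List (String × String)) : Bool :=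
  let d1 := PySem.Dict.ofList dict1
  let d2 := PySem.Dict.ofList dict2
  -- set(dict1.keys()).union(dict2.keys()); the loop's result does not depend on set order
  goA d1 d2 (PySem.Set.union (PySem.Set.ofList d1.keys) d2.keys)

-- ===== PORT B =====
-- the 'for key, value in dict1.items(): …' loop of B, with early return
def goB (d2 : PySem.Dict String String) : List (String × String) → Bool
  | [] => true
  | (k, v) :: rest =>
    match d2.get? k with
    | none => false
    | some w => if w != v then false else goB d2 rest

def compare_dictionaries_alt (dict1 : List (String × String)) (dict2 : List (String × String)) : Bool :=
  let d1 := PySem.Dict.ofList dict1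
  let d2 := PySem.Dict.ofList dict2
  if d1.size != d2.size then false
  else goB d2 d1.items

-- ===== PRECONDITION & SPEC =====
def Spec_compare_dictionaries (dict1 : List (String × String)) (dict2 : List (String × String)) (out : Bool) : Prop := out = compare_dictionaries_alt dict1 dict2
instance (dict1 : List (String × String)) (dict2 : List (String × String)) (out : Bool) : Decidable (Spec_compare_dictionaries dict1 dict2 out) := by unfold Spec_compare_dictionaries; infer_instance

-- ===== CLAIM (what is proved, stated in full; the proofs are below) =====
def Claim_equal_compare_dictionaries : Prop := ∀ (dict1 : List (String × String)) (dict2 : List (String × String)), Dom_compare_dictionaries dict1 dict2 → Spec_compare_dictionaries dict1 dict2 (compare_dictionaries dict1 dict2)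

-- ===== LEMMAS AND PROOFS =====

theorem goA_eq_true_iff (d1 d2 : PySem.Dict String String) (l : List String) :
    goA d1 d2 l = true ↔ ∀ k ∈ l, d1.contains k = true ∧ d2.contains k = true ∧ d1.get? k = d2.get? k := by
  induction l with
  | nil => simp [goA]
  | cons k ks ih =>
    simp only [goA]
    split_ifs with h1 h2 h3
    · simp_all
    · simp_all
    · constructor
      · intro h; simp at h
      · intro h
        have := (h k (by simp)).2.2
        simp_all
    · simp only [List.mem_cons]
      constructor
      · intro h x hx
        rcases hx with rfl | hx
        · refine ⟨by simpa using h1, by simpa using h2, ?_⟩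
          simpa [bne] using h3
        · exact (ih.mp h) x hx
      · intro h
        exact ih.mpr (fun x hx => h x (Or.inr hx))

theorem goB_eq_true_iff (d2 : PySem.Dict String String) (l : List (String × String)) :
    goB d2 l = true ↔ ∀ p ∈ l, d2.get? p.1 = some p.2 := by
  induction l with
  | nil => simp [goB]
  | cons p rest ih =>
    obtain ⟨k, v⟩ := p
    simp only [goB]
    cases hg : d2.get? k with
    | none => simp_all
    | some w =>
      simp only
      split_ifs with hw
      · constructor
        · intro h; simp at h
        · intro h
          have := h (k, v) (by simp)
          simp only at this
          rw [hg] at this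
          simp at this
          subst this
          simp [bne] at hw
      · have hwv : w = v := by simpa [bne] using hw
        subst hwv
        simp only [List.mem_cons]
        constructor
        · intro h p hp
          rcases hp with rfl | hp
          · simpa using hg
          · exact (ih.mp h) p hp
        · intro h
          exact ih.mpr (fun q hq => h q (Or.inr hq))

-- membership in a key gives an item pair
theorem exists_item_of_mem_keys (d : PySem.Dict String String) (k : String) (h : k ∈ d.keys) :
    ∃ v, (k, v) ∈ d.items := by
  simp only [PySem.Dict.keys, List.mem_map] at h
  obtain ⟨p, hp, rfl⟩ := h
  exact ⟨p.2, hp⟩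

-- core equivalence on two dicts with Nodup keys
theorem core_eq (d1 d2 : PySem.Dict String String)
    (h1 : d1.keys.Nodup) (h2 : d2.keys.Nodup) :
    goA d1 d2 (PySem.Set.union (PySem.Set.ofList d1.keys) d2.keys)
      = (if d1.size != d2.size then false else goB d2 d1.items) := by
  have hmemU : ∀ k, k ∈ PySem.Set.union (PySem.Set.ofList d1.keys) d2.keys ↔ k ∈ d1.keys ∨ k ∈ d2.keys := by
    intro k
    rw [PySem.Set.mem_union, PySem.Set.mem_ofList]
  have hsz1 : d1.size = d1.keys.length := by
    simp [PySem.Dict.size, PySem.Dict.keys]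
  have hsz2 : d2.size = d2.keys.length := by
    simp [PySem.Dict.size, PySem.Dict.keys]
  by_cases hA : goA d1 d2 (PySem.Set.union (PySem.Set.ofList d1.keys) d2.keys) = true
  · -- A returns True: keys agree as sets and lookups agree
    have hall := (goA_eq_true_iff d1 d2 _).mp hA
    have hkeys : ∀ k, k ∈ d1.keys ↔ k ∈ d2.keys := by
      intro k
      constructor
      · intro hk
        exact (PySem.Dict.contains_iff_mem_keys _ _).mp
          (hall k ((hmemU k).mpr (Or.inl hk))).2.1
      · intro hk
        exact (PySem.Dict.contains_iff_mem_keys _ _).mp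
          (hall k ((hmemU k).mpr (Or.inr hk))).1
    have hperm : d1.keys.Perm d2.keys := (List.perm_ext_iff_of_nodup h1 h2).mpr hkeys
    have hlen : d1.size = d2.size := by rw [hsz1, hsz2, hperm.length_eq]
    rw [hA]
    have hB : goB d2 d1.items = true := by
      rw [goB_eq_true_iff]
      intro p hp
      have hk1 : p.1 ∈ d1.keys := PySem.Dict.mem_keys_of_mem_items d1 hp
      have hg1 : d1.get? p.1 = some p.2 := PySem.Dict.get?_of_mem_items d1 hp h1
      have := (hall p.1 ((hmemU p.1).mpr (Or.inl hk1))).2.2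
      rw [← this, hg1]
    rw [hB, hlen]
    simp
  · -- A returns False
    have hAf : goA d1 d2 (PySem.Set.union (PySem.Set.ofList d1.keys) d2.keys) = false := by
      cases hc : goA d1 d2 (PySem.Set.union (PySem.Set.ofList d1.keys) d2.keys) with
      | true => exact absurd hc hA
      | false => rfl
    rw [hAf]
    -- suppose B returned true; derive A = true, contradiction
    by_cases hlen : d1.size = d2.size
    · by_cases hB : goB d2 d1.items = true
      · exfalso
        apply hA
        have hitems := (goB_eq_true_iff d2 d1.items).mp hB
        -- every key of d1 is in d2 with the same value
        have hsub : ∀ k ∈ d1.keys, k ∈ d2.keys ∧ d1.get? k = d2.get? k := by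
          intro k hk
          obtain ⟨v, hv⟩ := exists_item_of_mem_keys d1 k hk
          have hg2 : d2.get? k = some v := hitems (k, v) hv
          have hg1 : d1.get? k = some v := PySem.Dict.get?_of_mem_items d1 hv h1
          refine ⟨?_, by rw [hg1, hg2]⟩
          exact PySem.Dict.mem_keys_of_mem_items d2 (PySem.Dict.mem_items_of_get?_eq_some d2 hg2)
        -- keys1 ⊆ keys2 with Nodup on both and equal lengths ⇒ same key sets
        have hsubset : d1.keys ⊆ d2.keys := fun k hk => (hsub k hk).1
        have hsp : d1.keys.Subperm d2.keys := h1.subperm hsubset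
        have hperm : d1.keys.Perm d2.keys := by
          refine hsp.perm_of_length_le ?_
          rw [← hsz1, ← hsz2, hlen]
        have hkeys2 : ∀ k ∈ d2.keys, k ∈ d1.keys := fun k hk => (hperm.mem_iff).mpr hk
        rw [goA_eq_true_iff]
        intro k hk
        have hk1 : k ∈ d1.keys := by
          rcases (hmemU k).mp hk with h | h
          · exact h
          · exact hkeys2 k h
        obtain ⟨hk2, heq⟩ := hsub k hk1
        exact ⟨(PySem.Dict.contains_iff_mem_keys _ _).mpr hk1,
               (PySem.Dict.contains_iff_mem_keys _ _).mpr hk2, heq⟩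
      · have : goB d2 d1.items = false := by
          cases hc : goB d2 d1.items with
          | true => exact absurd hc hB
          | false => rfl
        rw [this]
        simp
    · have : (d1.size != d2.size) = true := by simpa [bne] using hlen
      rw [this]
      simp

-- ===== VERDICT (by name: the statement is the Claim_ definition above) =====
theorem compare_dictionaries_spec : Claim_equal_compare_dictionaries := by
  intro dict1 dict2 _
  unfold Spec_compare_dictionaries compare_dictionaries compare_dictionaries_alt
  exact core_eq _ _ (PySem.Dict.nodup_keys_ofList dict1) (PySem.Dict.nodup_keys_ofList dict2)
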